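-- pv_equiv track=rewrite | github.com/J-nowcow/programmers_python | Level 4/쿠키 구입.py | solution
-- ===== SOURCE A (Python) =====
-- def solution(cookie):
--     answer = 0
--     for m in range(len(cookie)-1):
--         l = m; r = m+1
--         a = cookie[m]; b = cookie[m+1]
--         while True:
--             # 양쪽 개수 같은 경우
--             if a == b:
--                 answer = max(answer,a)
--                 if l == 0 or r == len(cookie)-1: break
--                 l -=1; r += 1
--                 a += cookie[l]; b += cookie[r]
--             elif a < b:
--                 if l == 0: break
--                 l -= 1; a += cookie[l]
--             else:
--                 if r == len(cookie)-1: break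
--                 r += 1; b += cookie[r]
--     return answer
-- ===== SOURCE B (Python) =====
-- def solution(cookie):
--     # Prefix sums + hash-set midpoint lookup over endpoint pairs (no center expansion).
--     P = [0]
--     for x in cookie:
--         P.append(P[-1] + x)
--     s = set(P)
--     best = 0
--     n1 = len(P)
--     for i in range(n1):
--         for k in range(i + 1, n1):
--             t = P[i] + P[k]
--             if t % 2 == 0 and t // 2 in s:
--                 best = max(best, (P[k] - P[i]) // 2)
--     return best
-- ===== Notes on version B (the rewrite author's own statement) =====
-- stated objective: alternative
-- what changed: Replaces A's per-center two-pointer expansion with prefix sums plus a hash-set midpoint membership test over all endpoint pairs; Pre_ admits nonnegative lists (the task's natural domain of cookie counts) plus all lists whose balanced prefix pairs all have nonpositive half-difference (both provably return 0 there), excluding only mixed-sign lists with a positive balanced pair, where A's expansion misses equal splits B finds.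
-- outside the precondition, e.g. on solution([3, -2, 2, -1]): A returns 0, B returns 1
import Mathlib
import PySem

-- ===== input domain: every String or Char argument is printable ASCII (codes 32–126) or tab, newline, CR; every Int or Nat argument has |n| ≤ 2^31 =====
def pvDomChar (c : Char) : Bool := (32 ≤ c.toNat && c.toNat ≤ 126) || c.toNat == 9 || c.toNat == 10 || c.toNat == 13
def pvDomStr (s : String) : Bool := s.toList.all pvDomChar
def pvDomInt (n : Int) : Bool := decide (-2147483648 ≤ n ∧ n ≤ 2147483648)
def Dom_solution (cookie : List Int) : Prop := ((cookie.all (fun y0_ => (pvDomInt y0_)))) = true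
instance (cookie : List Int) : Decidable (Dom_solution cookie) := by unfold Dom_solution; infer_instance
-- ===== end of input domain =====

-- B replaces A's per-center two-pointer expansion by prefix sums with a hash-set midpoint test
-- over endpoint pairs (alternative algorithm, same O(n^2) cost); proved equal on nonnegative inputs.


-- ===== PORT A =====
-- A's inner 'while True' two-pointer expansion; l,r move outward, a,b are the two running sums.
-- The proof argument hr (r stays in range) is needed only for termination.
def loopA (c : List Int) (n : Nat) (l r : Nat) (hr : r < n) (a b ans : Int) : Int :=
  if a = b then
    if h : l = 0 ∨ r = n - 1 then max ans a
    else loopA c n (l - 1) (r + 1) (by omega) (a + c.getD (l - 1) 0) (b + c.getD (r + 1) 0) (max ans a)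
  else if a < b then
    if l = 0 then ans
    else loopA c n (l - 1) r hr (a + c.getD (l - 1) 0) b ans
  else
    if h : r = n - 1 then ans
    else loopA c n l (r + 1) (by omega) a (b + c.getD (r + 1) 0) ans
termination_by l + (n - 1 - r)
decreasing_by all_goals omega

def solution (cookie : List Int) : Int :=
  (List.range (cookie.length - 1)).attach.foldl
    (fun ans m =>
      loopA cookie cookie.length m.1 (m.1 + 1)
        (by have := List.mem_range.mp m.2; omega)
        (cookie.getD m.1 0) (cookie.getD (m.1 + 1) 0) ans) 0

-- ===== PORT B =====
-- P = [0]; for x in cookie: P.append(P[-1] + x)   (running prefix sums, head value = acc + first x)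
def buildP : List Int → Int → List Int
  | [], _ => []
  | x :: xs, acc => (acc + x) :: buildP xs (acc + x)

def solution_alt (cookie : List Int) : Int :=
  let P := (0 : Int) :: buildP cookie 0
  let s := PySem.Set.ofList P
  let n1 := P.length
  (List.range n1).foldl (fun best i =>
    (List.range' (i + 1) (n1 - (i + 1))).foldl (fun best k =>
      let t := P.getD i 0 + P.getD k 0
      if PySem.Int.mod t 2 = 0 ∧ PySem.Set.contains s (PySem.Int.floordiv t 2) then
        max best (PySem.Int.floordiv (P.getD k 0 - P.getD i 0) 2)
      else best) best) 0

-- ===== PRECONDITION & SPEC =====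
-- prefix sum of the first i entries
def pf (c : List Int) (i : Nat) : Int := (c.take i).sum

-- Pre_ admits nonnegative lists (cookie counts, the task's natural domain) and, beyond them, every
-- list in which each balanced prefix pair (2*pf t = pf i + pf k) has nonpositive half-difference —
-- there both programs provably return 0. Excluded are only mixed-sign lists with a positive balanced
-- pair: A returns there too, but its center-expansion can miss equal splits that B's global
-- prefix-midpoint search finds (e.g. [3,-2,2,-1]: A returns 0, B returns 1); both behaviours are
-- accidental extensions of an unspecified corner (cookie counts are nonnegative).
def Pre_solution (cookie : List Int) : Prop :=
  (∀ x ∈ cookie, 0 ≤ x) ∨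
  (∀ i ∈ List.range (cookie.length + 1), ∀ k ∈ List.range (cookie.length + 1),
    ∀ t ∈ List.range (cookie.length + 1),
    i < k → 2 * pf cookie t = pf cookie i + pf cookie k → pf cookie k ≤ pf cookie i)
instance (cookie : List Int) : Decidable (Pre_solution cookie) := by unfold Pre_solution; infer_instance

def pvWitness_solution : List Int := [1, 1, 2, 3]

def Spec_solution (cookie : List Int) (out : Int) : Prop := out = solution_alt cookie
instance (cookie : List Int) (out : Int) : Decidable (Spec_solution cookie out) := by unfold Spec_solution; infer_instance

-- ===== CLAIM (what is proved, stated in full; the proofs are below) =====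
def Claim_equal_solution : Prop := ∀ (cookie : List Int), Dom_solution cookie → Pre_solution cookie → Spec_solution cookie (solution cookie)

-- ===== LEMMAS AND PROOFS =====

-- an equal split around gap m over interval [i..j]
def IsPair (c : List Int) (m i j : Nat) : Prop :=
  i ≤ m ∧ m < j ∧ j < c.length ∧ pf c (m + 1) - pf c i = pf c (j + 1) - pf c (m + 1)

theorem getD_nonneg (c : List Int) (h : ∀ x ∈ c, 0 ≤ x) (k : Nat) : 0 ≤ c.getD k 0 := by
  rcases Nat.lt_or_ge k c.length with hk | hk
  · rw [List.getD_eq_getElem c 0 hk]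
    exact h _ (List.getElem_mem hk)
  · rw [List.getD_eq_default c 0 hk]

theorem pf_step (c : List Int) (k : Nat) (hk : k < c.length) :
    pf c (k + 1) = pf c k + c.getD k 0 := by
  rw [pf, pf, List.getD_eq_getElem c 0 hk]
  exact List.sum_take_succ c k hk

theorem pf_mono (c : List Int) (h : ∀ x ∈ c, 0 ≤ x) {i j : Nat} (hij : i ≤ j) :
    pf c i ≤ pf c j := by
  have step : ∀ k : Nat, pf c k ≤ pf c (k + 1) := by
    intro k
    rcases Nat.lt_or_ge k c.length with hk | hk
    · rw [pf_step c k hk]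
      have := getD_nonneg c h k
      omega
    · unfold pf
      rw [List.take_of_length_le hk, List.take_of_length_le (by omega)]
  induction j, hij using Nat.le_induction with
  | base => rfl
  | succ j hij ih => exact le_trans ih (step j)

-- generic characterisation of a foldl whose step is "keep or raise to a candidate value"
theorem fold_char {α : Type} (f : Int → α → Int) (V : α → Int → Prop)
    (h1 : ∀ a x, a ≤ f a x)
    (h2 : ∀ a x v, V x v → v ≤ f a x)
    (h3 : ∀ a x, f a x = a ∨ ∃ v, V x v ∧ f a x = v) :
    ∀ (l : List α) (a : Int),
      a ≤ l.foldl f a ∧ (∀ x ∈ l, ∀ v, V x v → v ≤ l.foldl f a) ∧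
      (l.foldl f a = a ∨ ∃ x ∈ l, ∃ v, V x v ∧ l.foldl f a = v) := by
  intro l
  induction l with
  | nil => intro a; exact ⟨le_refl _, by simp, Or.inl rfl⟩
  | cons x xs ih =>
    intro a
    obtain ⟨ih1, ih2, ih3⟩ := ih (f a x)
    refine ⟨le_trans (h1 a x) ih1, ?_, ?_⟩
    · intro y hy v hv
      rcases List.mem_cons.mp hy with rfl | hy
      · exact le_trans (h2 a y v hv) ih1
      · exact ih2 y hy v hv
    · rcases ih3 with h | ⟨y, hy, v, hv, he⟩
      · rcases h3 a x with h' | ⟨v, hv, h'⟩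
        · exact Or.inl (by simpa [h'] using h)
        · exact Or.inr ⟨x, List.mem_cons_self .., v, hv, by simpa [h'] using h⟩
      · exact Or.inr ⟨y, List.mem_cons_of_mem x hy, v, hv, he⟩

-- same, for (i)/(iii) only, when the step need not dominate candidate values
theorem fold_char2 {α : Type} (f : Int → α → Int) (V : α → Int → Prop)
    (h1 : ∀ a x, a ≤ f a x)
    (h3 : ∀ a x, f a x = a ∨ ∃ v, V x v ∧ f a x = v) :
    ∀ (l : List α) (a : Int),
      a ≤ l.foldl f a ∧
      (l.foldl f a = a ∨ ∃ x ∈ l, ∃ v, V x v ∧ l.foldl f a = v) := by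
  intro l
  induction l with
  | nil => intro a; exact ⟨le_refl _, Or.inl rfl⟩
  | cons x xs ih =>
    intro a
    obtain ⟨ih1, ih3⟩ := ih (f a x)
    refine ⟨le_trans (h1 a x) ih1, ?_⟩
    rcases ih3 with h | ⟨y, hy, v, hv, he⟩
    · rcases h3 a x with h' | ⟨v, hv, h'⟩
      · exact Or.inl (by simpa [h'] using h)
      · exact Or.inr ⟨x, List.mem_cons_self .., v, hv, by simpa [h'] using h⟩
    · exact Or.inr ⟨y, List.mem_cons_of_mem x hy, v, hv, he⟩

-- the two-pointer loop computes: max of ans and every equal-pair value reachable outward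
theorem loopA_char (c : List Int) (hpos : ∀ x ∈ c, 0 ≤ x) (m : Nat) :
    ∀ (l r : Nat) (hr : r < c.length) (ans : Int), l ≤ m → m < r →
      (ans ≤ loopA c c.length l r hr (pf c (m+1) - pf c l) (pf c (r+1) - pf c (m+1)) ans) ∧
      (∀ i j : Nat, i ≤ l → r ≤ j → j < c.length →
        pf c (m+1) - pf c i = pf c (j+1) - pf c (m+1) →
        pf c (m+1) - pf c i ≤ loopA c c.length l r hr (pf c (m+1) - pf c l) (pf c (r+1) - pf c (m+1)) ans) ∧
      (loopA c c.length l r hr (pf c (m+1) - pf c l) (pf c (r+1) - pf c (m+1)) ans = ans ∨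
        ∃ i j : Nat, IsPair c m i j ∧
          loopA c c.length l r hr (pf c (m+1) - pf c l) (pf c (r+1) - pf c (m+1)) ans = pf c (m+1) - pf c i) := by
  have main : ∀ (mu l r : Nat) (hr : r < c.length) (ans : Int),
      l + (c.length - 1 - r) ≤ mu → l ≤ m → m < r →
      (ans ≤ loopA c c.length l r hr (pf c (m+1) - pf c l) (pf c (r+1) - pf c (m+1)) ans) ∧
      (∀ i j : Nat, i ≤ l → r ≤ j → j < c.length →
        pf c (m+1) - pf c i = pf c (j+1) - pf c (m+1) →
        pf c (m+1) - pf c i ≤ loopA c c.length l r hr (pf c (m+1) - pf c l) (pf c (r+1) - pf c (m+1)) ans) ∧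
      (loopA c c.length l r hr (pf c (m+1) - pf c l) (pf c (r+1) - pf c (m+1)) ans = ans ∨
        ∃ i j : Nat, IsPair c m i j ∧
          loopA c c.length l r hr (pf c (m+1) - pf c l) (pf c (r+1) - pf c (m+1)) ans = pf c (m+1) - pf c i) := by
    intro mu
    induction mu using Nat.strong_induction_on with
    | _ mu ih =>
      intro l r hr ans hmu hlm hmr
      by_cases hab : (pf c (m+1) - pf c l) = (pf c (r+1) - pf c (m+1))
      · have hpair : IsPair c m l r := ⟨hlm, hmr, hr, hab⟩
        by_cases hbr : l = 0 ∨ r = c.length - 1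
        · have hres : loopA c c.length l r hr (pf c (m+1) - pf c l) (pf c (r+1) - pf c (m+1)) ans
              = max ans (pf c (m+1) - pf c l) := by
            rw [loopA.eq_def, if_pos hab, dif_pos hbr]
          rw [hres]
          refine ⟨le_max_left _ _, ?_, ?_⟩
          · intro i j hi hj hjn heq
            rcases hbr with h0 | hn
            · have : i = 0 := by omega
              subst this; subst h0
              exact le_max_right _ _
            · have : j = r := by omega
              subst this
              rw [heq, ← hab]
              exact le_max_right _ _
          · rcases max_choice ans (pf c (m+1) - pf c l) with h | h
            · exact Or.inl h
            · exact Or.inr ⟨l, r, hpair, h⟩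
        · have hl1 : 1 ≤ l := by omega
          have hrn : r + 1 < c.length := by omega
          have e1 : pf c (m+1) - pf c l + c.getD (l-1) 0 = pf c (m+1) - pf c (l-1) := by
            have := pf_step c (l-1) (by omega)
            have : pf c (l-1+1) = pf c (l-1) + c.getD (l-1) 0 := this
            have hll : l - 1 + 1 = l := by omega
            rw [hll] at this; omega
          have e2 : pf c (r+1) - pf c (m+1) + c.getD (r+1) 0 = pf c (r+1+1) - pf c (m+1) := by
            have := pf_step c (r+1) hrn
            omega
          have hres : loopA c c.length l r hr (pf c (m+1) - pf c l) (pf c (r+1) - pf c (m+1)) ans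
              = loopA c c.length (l-1) (r+1) (by omega) (pf c (m+1) - pf c (l-1)) (pf c (r+1+1) - pf c (m+1)) (max ans (pf c (m+1) - pf c l)) := by
            rw [loopA.eq_def, if_pos hab, dif_neg hbr, e1, e2]
          rw [hres]
          obtain ⟨I1, I2, I3⟩ := ih (mu - 1) (by omega) (l-1) (r+1) (by omega)
            (max ans (pf c (m+1) - pf c l)) (by omega) (by omega) (by omega)
          refine ⟨le_trans (le_max_left _ _) I1, ?_, ?_⟩
          · intro i j hi hj hjn heq
            by_cases hil : i = l
            · subst hil
              exact le_trans (le_max_right _ _) I1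
            · by_cases hjr : j = r
              · subst hjr
                rw [heq, ← hab]
                exact le_trans (le_max_right _ _) I1
              · exact I2 i j (by omega) (by omega) hjn heq
          · rcases I3 with h | ⟨i, j, hp, h⟩
            · rcases max_choice ans (pf c (m+1) - pf c l) with h' | h'
              · exact Or.inl (by rw [h, h'])
              · exact Or.inr ⟨l, r, hpair, by rw [h, h']⟩
            · exact Or.inr ⟨i, j, hp, h⟩
      · by_cases hlt : (pf c (m+1) - pf c l) < (pf c (r+1) - pf c (m+1))
        · by_cases hl0 : l = 0
          · have hres : loopA c c.length l r hr (pf c (m+1) - pf c l) (pf c (r+1) - pf c (m+1)) ans = ans := by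
              rw [loopA.eq_def, if_neg hab, if_pos hlt, if_pos hl0]
            rw [hres]
            refine ⟨le_refl _, ?_, Or.inl rfl⟩
            intro i j hi hj hjn heq
            have : i = 0 := by omega
            subst this; subst hl0
            have hm1 : pf c (r+1) ≤ pf c (j+1) := pf_mono c hpos (by omega)
            omega
          · have e1 : pf c (m+1) - pf c l + c.getD (l-1) 0 = pf c (m+1) - pf c (l-1) := by
              have := pf_step c (l-1) (by omega)
              have : pf c (l-1+1) = pf c (l-1) + c.getD (l-1) 0 := this
              have hll : l - 1 + 1 = l := by omega
              rw [hll] at this; omega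
            have hres : loopA c c.length l r hr (pf c (m+1) - pf c l) (pf c (r+1) - pf c (m+1)) ans
                = loopA c c.length (l-1) r hr (pf c (m+1) - pf c (l-1)) (pf c (r+1) - pf c (m+1)) ans := by
              rw [loopA.eq_def, if_neg hab, if_pos hlt, if_neg hl0, e1]
            rw [hres]
            obtain ⟨I1, I2, I3⟩ := ih (mu - 1) (by omega) (l-1) r hr ans (by omega) (by omega) hmr
            refine ⟨I1, ?_, I3⟩
            intro i j hi hj hjn heq
            by_cases hil : i = l
            · subst hil
              have hm1 : pf c (r+1) ≤ pf c (j+1) := pf_mono c hpos (by omega)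
              omega
            · exact I2 i j (by omega) hj hjn heq
        · have hgt : (pf c (r+1) - pf c (m+1)) < (pf c (m+1) - pf c l) := by omega
          by_cases hrn : r = c.length - 1
          · have hres : loopA c c.length l r hr (pf c (m+1) - pf c l) (pf c (r+1) - pf c (m+1)) ans = ans := by
              rw [loopA.eq_def, if_neg hab, if_neg hlt, dif_pos hrn]
            rw [hres]
            refine ⟨le_refl _, ?_, Or.inl rfl⟩
            intro i j hi hj hjn heq
            have : j = r := by omega
            subst this
            have hm1 : pf c i ≤ pf c l := pf_mono c hpos hi
            omega
          · have hr2 : r + 1 < c.length := by omega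
            have e2 : pf c (r+1) - pf c (m+1) + c.getD (r+1) 0 = pf c (r+1+1) - pf c (m+1) := by
              have := pf_step c (r+1) hr2
              omega
            have hres : loopA c c.length l r hr (pf c (m+1) - pf c l) (pf c (r+1) - pf c (m+1)) ans
                = loopA c c.length l (r+1) (by omega) (pf c (m+1) - pf c l) (pf c (r+1+1) - pf c (m+1)) ans := by
              rw [loopA.eq_def, if_neg hab, if_neg hlt, dif_neg hrn, e2]
            rw [hres]
            obtain ⟨I1, I2, I3⟩ := ih (mu - 1) (by omega) l (r+1) (by omega) ans (by omega) hlm (by omega)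
            refine ⟨I1, ?_, I3⟩
            intro i j hi hj hjn heq
            by_cases hjr : j = r
            · subst hjr
              have hm1 : pf c i ≤ pf c l := pf_mono c hpos hi
              omega
            · exact I2 i j hi (by omega) hjn heq
  intro l r hr ans hlm hmr
  exact main (l + (c.length - 1 - r)) l r hr ans (le_refl _) hlm hmr

-- (i)/(iii) of the loop characterisation hold without any sign assumption
theorem loopA_basic (c : List Int) (m : Nat) :
    ∀ (l r : Nat) (hr : r < c.length) (ans : Int), l ≤ m → m < r →
      (ans ≤ loopA c c.length l r hr (pf c (m+1) - pf c l) (pf c (r+1) - pf c (m+1)) ans) ∧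
      (loopA c c.length l r hr (pf c (m+1) - pf c l) (pf c (r+1) - pf c (m+1)) ans = ans ∨
        ∃ i j : Nat, IsPair c m i j ∧
          loopA c c.length l r hr (pf c (m+1) - pf c l) (pf c (r+1) - pf c (m+1)) ans = pf c (m+1) - pf c i) := by
  have main : ∀ (mu l r : Nat) (hr : r < c.length) (ans : Int),
      l + (c.length - 1 - r) ≤ mu → l ≤ m → m < r →
      (ans ≤ loopA c c.length l r hr (pf c (m+1) - pf c l) (pf c (r+1) - pf c (m+1)) ans) ∧
      (loopA c c.length l r hr (pf c (m+1) - pf c l) (pf c (r+1) - pf c (m+1)) ans = ans ∨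
        ∃ i j : Nat, IsPair c m i j ∧
          loopA c c.length l r hr (pf c (m+1) - pf c l) (pf c (r+1) - pf c (m+1)) ans = pf c (m+1) - pf c i) := by
    intro mu
    induction mu using Nat.strong_induction_on with
    | _ mu ih =>
      intro l r hr ans hmu hlm hmr
      by_cases hab : (pf c (m+1) - pf c l) = (pf c (r+1) - pf c (m+1))
      · have hpair : IsPair c m l r := ⟨hlm, hmr, hr, hab⟩
        by_cases hbr : l = 0 ∨ r = c.length - 1
        · have hres : loopA c c.length l r hr (pf c (m+1) - pf c l) (pf c (r+1) - pf c (m+1)) ans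
              = max ans (pf c (m+1) - pf c l) := by
            rw [loopA.eq_def, if_pos hab, dif_pos hbr]
          rw [hres]
          refine ⟨le_max_left _ _, ?_⟩
          rcases max_choice ans (pf c (m+1) - pf c l) with h | h
          · exact Or.inl h
          · exact Or.inr ⟨l, r, hpair, h⟩
        · have e1 : pf c (m+1) - pf c l + c.getD (l-1) 0 = pf c (m+1) - pf c (l-1) := by
            have := pf_step c (l-1) (by omega)
            have : pf c (l-1+1) = pf c (l-1) + c.getD (l-1) 0 := this
            have hll : l - 1 + 1 = l := by omega
            rw [hll] at this; omega
          have e2 : pf c (r+1) - pf c (m+1) + c.getD (r+1) 0 = pf c (r+1+1) - pf c (m+1) := by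
            have := pf_step c (r+1) (by omega)
            omega
          have hres : loopA c c.length l r hr (pf c (m+1) - pf c l) (pf c (r+1) - pf c (m+1)) ans
              = loopA c c.length (l-1) (r+1) (by omega) (pf c (m+1) - pf c (l-1)) (pf c (r+1+1) - pf c (m+1)) (max ans (pf c (m+1) - pf c l)) := by
            rw [loopA.eq_def, if_pos hab, dif_neg hbr, e1, e2]
          rw [hres]
          obtain ⟨I1, I3⟩ := ih (mu - 1) (by omega) (l-1) (r+1) (by omega)
            (max ans (pf c (m+1) - pf c l)) (by omega) (by omega) (by omega)
          refine ⟨le_trans (le_max_left _ _) I1, ?_⟩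
          rcases I3 with h | ⟨i, j, hp, h⟩
          · rcases max_choice ans (pf c (m+1) - pf c l) with h' | h'
            · exact Or.inl (by rw [h, h'])
            · exact Or.inr ⟨l, r, hpair, by rw [h, h']⟩
          · exact Or.inr ⟨i, j, hp, h⟩
      · by_cases hlt : (pf c (m+1) - pf c l) < (pf c (r+1) - pf c (m+1))
        · by_cases hl0 : l = 0
          · have hres : loopA c c.length l r hr (pf c (m+1) - pf c l) (pf c (r+1) - pf c (m+1)) ans = ans := by
              rw [loopA.eq_def, if_neg hab, if_pos hlt, if_pos hl0]
            rw [hres]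
            exact ⟨le_refl _, Or.inl rfl⟩
          · have e1 : pf c (m+1) - pf c l + c.getD (l-1) 0 = pf c (m+1) - pf c (l-1) := by
              have := pf_step c (l-1) (by omega)
              have : pf c (l-1+1) = pf c (l-1) + c.getD (l-1) 0 := this
              have hll : l - 1 + 1 = l := by omega
              rw [hll] at this; omega
            have hres : loopA c c.length l r hr (pf c (m+1) - pf c l) (pf c (r+1) - pf c (m+1)) ans
                = loopA c c.length (l-1) r hr (pf c (m+1) - pf c (l-1)) (pf c (r+1) - pf c (m+1)) ans := by
              rw [loopA.eq_def, if_neg hab, if_pos hlt, if_neg hl0, e1]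
            rw [hres]
            obtain ⟨I1, I3⟩ := ih (mu - 1) (by omega) (l-1) r hr ans (by omega) (by omega) hmr
            exact ⟨I1, I3⟩
        · by_cases hrn : r = c.length - 1
          · have hres : loopA c c.length l r hr (pf c (m+1) - pf c l) (pf c (r+1) - pf c (m+1)) ans = ans := by
              rw [loopA.eq_def, if_neg hab, if_neg hlt, dif_pos hrn]
            rw [hres]
            exact ⟨le_refl _, Or.inl rfl⟩
          · have e2 : pf c (r+1) - pf c (m+1) + c.getD (r+1) 0 = pf c (r+1+1) - pf c (m+1) := by
              have := pf_step c (r+1) (by omega)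
              omega
            have hres : loopA c c.length l r hr (pf c (m+1) - pf c l) (pf c (r+1) - pf c (m+1)) ans
                = loopA c c.length l (r+1) (by omega) (pf c (m+1) - pf c l) (pf c (r+1+1) - pf c (m+1)) ans := by
              rw [loopA.eq_def, if_neg hab, if_neg hlt, dif_neg hrn, e2]
            rw [hres]
            obtain ⟨I1, I3⟩ := ih (mu - 1) (by omega) l (r+1) (by omega) ans (by omega) hlm (by omega)
            exact ⟨I1, I3⟩
  intro l r hr ans hlm hmr
  exact main (l + (c.length - 1 - r)) l r hr ans (le_refl _) hlm hmr

-- A's result with no sign assumption: nonnegative, and 0 or an equal-split value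
theorem solution_basic (c : List Int) :
    0 ≤ solution c ∧
    (solution c = 0 ∨ ∃ m i j, IsPair c m i j ∧ solution c = pf c (m+1) - pf c i) := by
  have key : ∀ (x : {x // x ∈ List.range (c.length - 1)}) (a : Int),
      (a ≤ loopA c c.length x.1 (x.1+1) (by have := List.mem_range.mp x.2; omega) (c.getD x.1 0) (c.getD (x.1+1) 0) a) ∧
      (loopA c c.length x.1 (x.1+1) (by have := List.mem_range.mp x.2; omega) (c.getD x.1 0) (c.getD (x.1+1) 0) a = a ∨
        ∃ v, (∃ i j, IsPair c x.1 i j ∧ v = pf c (x.1+1) - pf c i) ∧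
          loopA c c.length x.1 (x.1+1) (by have := List.mem_range.mp x.2; omega) (c.getD x.1 0) (c.getD (x.1+1) 0) a = v) := by
    intro x a
    have hx := List.mem_range.mp x.2
    have eq_a : c.getD x.1 0 = pf c (x.1+1) - pf c x.1 := by
      have := pf_step c x.1 (by omega); omega
    have eq_b : c.getD (x.1+1) 0 = pf c (x.1+1+1) - pf c (x.1+1) := by
      have := pf_step c (x.1+1) (by omega); omega
    rw [eq_a, eq_b]
    obtain ⟨L1, L3⟩ := loopA_basic c x.1 x.1 (x.1+1) (by omega) a (le_refl _) (by omega)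
    refine ⟨L1, ?_⟩
    rcases L3 with h | ⟨i, j, hp, h⟩
    · exact Or.inl h
    · exact Or.inr ⟨pf c (x.1+1) - pf c i, ⟨i, j, hp, rfl⟩, h⟩
  obtain ⟨H1, H3⟩ := fold_char2
    (f := fun ans (x : {x // x ∈ List.range (c.length - 1)}) =>
      loopA c c.length x.1 (x.1+1) (by have := List.mem_range.mp x.2; omega) (c.getD x.1 0) (c.getD (x.1+1) 0) ans)
    (V := fun x v => ∃ i j, IsPair c x.1 i j ∧ v = pf c (x.1+1) - pf c i)
    (fun a x => (key x a).1)
    (fun a x => (key x a).2)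
    (List.range (c.length - 1)).attach 0
  refine ⟨H1, ?_⟩
  rcases H3 with h | ⟨x, _, v, ⟨i, j, hp, rfl⟩, h⟩
  · exact Or.inl h
  · exact Or.inr ⟨x.1, i, j, hp, h⟩

-- when every balanced prefix pair has nonpositive half-difference, A records nothing positive
theorem solution_pre3 (c : List Int)
    (h3 : ∀ i ∈ List.range (c.length + 1), ∀ k ∈ List.range (c.length + 1),
      ∀ t ∈ List.range (c.length + 1),
      i < k → 2 * pf c t = pf c i + pf c k → pf c k ≤ pf c i) :
    solution c = 0 := by
  obtain ⟨h0, hV⟩ := solution_basic c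
  rcases hV with h | ⟨m, i, j, ⟨him, hmj, hjn, heq⟩, h⟩
  · exact h
  · have hT := h3 i (List.mem_range.mpr (by omega)) (j+1) (List.mem_range.mpr (by omega))
      (m+1) (List.mem_range.mpr (by omega)) (by omega) (by omega)
    omega

-- A's result: nonnegative, dominates every equal-split value, and is 0 or such a value
theorem solution_char (c : List Int) (hpos : ∀ x ∈ c, 0 ≤ x) :
    0 ≤ solution c ∧
    (∀ m i j, IsPair c m i j → pf c (m+1) - pf c i ≤ solution c) ∧
    (solution c = 0 ∨ ∃ m i j, IsPair c m i j ∧ solution c = pf c (m+1) - pf c i) := by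
  have key : ∀ (x : {x // x ∈ List.range (c.length - 1)}) (a : Int),
      (a ≤ loopA c c.length x.1 (x.1+1) (by have := List.mem_range.mp x.2; omega) (c.getD x.1 0) (c.getD (x.1+1) 0) a) ∧
      (∀ v, (∃ i j, IsPair c x.1 i j ∧ v = pf c (x.1+1) - pf c i) →
        v ≤ loopA c c.length x.1 (x.1+1) (by have := List.mem_range.mp x.2; omega) (c.getD x.1 0) (c.getD (x.1+1) 0) a) ∧
      (loopA c c.length x.1 (x.1+1) (by have := List.mem_range.mp x.2; omega) (c.getD x.1 0) (c.getD (x.1+1) 0) a = a ∨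
        ∃ v, (∃ i j, IsPair c x.1 i j ∧ v = pf c (x.1+1) - pf c i) ∧
          loopA c c.length x.1 (x.1+1) (by have := List.mem_range.mp x.2; omega) (c.getD x.1 0) (c.getD (x.1+1) 0) a = v) := by
    intro x a
    have hx := List.mem_range.mp x.2
    have eq_a : c.getD x.1 0 = pf c (x.1+1) - pf c x.1 := by
      have := pf_step c x.1 (by omega); omega
    have eq_b : c.getD (x.1+1) 0 = pf c (x.1+1+1) - pf c (x.1+1) := by
      have := pf_step c (x.1+1) (by omega); omega
    rw [eq_a, eq_b]
    obtain ⟨L1, L2, L3⟩ := loopA_char c hpos x.1 x.1 (x.1+1)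
      (by omega) a (le_refl _) (by omega)
    refine ⟨L1, ?_, ?_⟩
    · rintro v ⟨i, j, hp, rfl⟩
      exact L2 i j hp.1 (by have := hp.2.1; omega) hp.2.2.1 hp.2.2.2
    · rcases L3 with h | ⟨i, j, hp, h⟩
      · exact Or.inl h
      · exact Or.inr ⟨pf c (x.1+1) - pf c i, ⟨i, j, hp, rfl⟩, h⟩
  obtain ⟨H1, H2, H3⟩ := fold_char
    (f := fun ans (x : {x // x ∈ List.range (c.length - 1)}) =>
      loopA c c.length x.1 (x.1+1) (by have := List.mem_range.mp x.2; omega) (c.getD x.1 0) (c.getD (x.1+1) 0) ans)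
    (V := fun x v => ∃ i j, IsPair c x.1 i j ∧ v = pf c (x.1+1) - pf c i)
    (fun a x => (key x a).1)
    (fun a x v hv => (key x a).2.1 v hv)
    (fun a x => (key x a).2.2)
    (List.range (c.length - 1)).attach 0
  refine ⟨H1, ?_, ?_⟩
  · intro m i j hp
    have hm : m < c.length - 1 := by
      obtain ⟨_, h2, h3, _⟩ := hp
      omega
    exact H2 ⟨m, List.mem_range.mpr hm⟩ (List.mem_attach _ _) _ ⟨i, j, hp, rfl⟩
  · rcases H3 with h | ⟨x, _, v, ⟨i, j, hp, rfl⟩, h⟩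
    · exact Or.inl h
    · exact Or.inr ⟨x.1, i, j, hp, h⟩

-- B's result: nonnegative, dominates every equal-split value, and is 0 or such a value
theorem solution_alt_char (c : List Int) (hpos : ∀ x ∈ c, 0 ≤ x) :
    0 ≤ solution_alt c ∧
    (∀ m i j, IsPair c m i j → pf c (m+1) - pf c i ≤ solution_alt c) ∧
    (solution_alt c = 0 ∨ ∃ m i j, IsPair c m i j ∧ solution_alt c = pf c (m+1) - pf c i) := by
  have gen : ∀ (d : List Int) (acc : Int),
      acc :: buildP d acc = (List.range (d.length + 1)).map (fun i => acc + pf d i) := by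
    intro d
    induction d with
    | nil => intro acc; simp [buildP, pf]
    | cons x xs ihx =>
      intro acc
      show acc :: (acc + x) :: buildP xs (acc + x) = _
      rw [List.range_succ_eq_map, List.map_cons, List.map_map]
      congr 1
      · simp [pf]
      · rw [ihx (acc + x)]
        apply List.map_congr_left
        intro i _
        simp only [Function.comp_apply, pf, List.take_succ_cons, List.sum_cons]
        ring
  have hP : (0 : Int) :: buildP c 0 = (List.range (c.length + 1)).map (pf c) := by
    have := gen c 0
    simpa using this
  have Pget : ∀ i : Nat, i ≤ c.length → ((List.range (c.length + 1)).map (pf c)).getD i 0 = pf c i := by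
    intro i hi
    rw [List.getD_eq_getElem _ 0 (by simp; omega)]
    simp
  have Pmem : ∀ y : Int, y ∈ (List.range (c.length + 1)).map (pf c) ↔ ∃ t, t ≤ c.length ∧ pf c t = y := by
    intro y
    simp only [List.mem_map, List.mem_range]
    constructor
    · rintro ⟨t, ht, rfl⟩; exact ⟨t, by omega, rfl⟩
    · rintro ⟨t, ht, rfl⟩; exact ⟨t, by omega, rfl⟩
  have fd2 : ∀ q : Int, PySem.Int.floordiv (2 * q) 2 = q := by
    intro q
    rw [PySem.Int.floordiv_eq_ediv_of_pos (by norm_num)]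
    exact Int.mul_ediv_cancel_left q (by norm_num)
  have mod2 : ∀ q : Int, PySem.Int.mod (2 * q) 2 = 0 := by
    intro q
    exact (PySem.Int.mod_eq_zero_iff_dvd _ _).mpr ⟨q, rfl⟩
  simp only [solution_alt, hP, List.length_map, List.length_range]
  set PL := List.map (pf c) (List.range (c.length + 1)) with hPL
  have innerchar : ∀ (i : Nat) (l : List Nat) (a : Int),
      a ≤ l.foldl (fun best k => if PySem.Int.mod (PL.getD i 0 + PL.getD k 0) 2 = 0 ∧ (PySem.Set.ofList PL).contains (PySem.Int.floordiv (PL.getD i 0 + PL.getD k 0) 2) = true then max best (PySem.Int.floordiv (PL.getD k 0 - PL.getD i 0) 2) else best) a ∧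
      (∀ k ∈ l, ∀ v, (fun (k : Nat) (v : Int) => (PySem.Int.mod (PL.getD i 0 + PL.getD k 0) 2 = 0 ∧ (PySem.Set.ofList PL).contains (PySem.Int.floordiv (PL.getD i 0 + PL.getD k 0) 2) = true) ∧ v = PySem.Int.floordiv (PL.getD k 0 - PL.getD i 0) 2) k v → v ≤ l.foldl (fun best k => if PySem.Int.mod (PL.getD i 0 + PL.getD k 0) 2 = 0 ∧ (PySem.Set.ofList PL).contains (PySem.Int.floordiv (PL.getD i 0 + PL.getD k 0) 2) = true then max best (PySem.Int.floordiv (PL.getD k 0 - PL.getD i 0) 2) else best) a) ∧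
      (l.foldl (fun best k => if PySem.Int.mod (PL.getD i 0 + PL.getD k 0) 2 = 0 ∧ (PySem.Set.ofList PL).contains (PySem.Int.floordiv (PL.getD i 0 + PL.getD k 0) 2) = true then max best (PySem.Int.floordiv (PL.getD k 0 - PL.getD i 0) 2) else best) a = a ∨ ∃ k ∈ l, ∃ v, (fun (k : Nat) (v : Int) => (PySem.Int.mod (PL.getD i 0 + PL.getD k 0) 2 = 0 ∧ (PySem.Set.ofList PL).contains (PySem.Int.floordiv (PL.getD i 0 + PL.getD k 0) 2) = true) ∧ v = PySem.Int.floordiv (PL.getD k 0 - PL.getD i 0) 2) k v ∧ l.foldl (fun best k => if PySem.Int.mod (PL.getD i 0 + PL.getD k 0) 2 = 0 ∧ (PySem.Set.ofList PL).contains (PySem.Int.floordiv (PL.getD i 0 + PL.getD k 0) 2) = true then max best (PySem.Int.floordiv (PL.getD k 0 - PL.getD i 0) 2) else best) a = v) := by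
    intro i
    apply fold_char
    · intro a k
      dsimp only
      split_ifs
      · exact le_max_left _ _
      · exact le_refl _
    · intro a k v hv
      obtain ⟨hc, rfl⟩ := hv
      rw [if_pos hc]
      exact le_max_right _ _
    · intro a k
      dsimp only
      split_ifs with h
      · rcases max_choice a (PySem.Int.floordiv (PL.getD k 0 - PL.getD i 0) 2) with h' | h'
        · exact Or.inl h'
        · exact Or.inr ⟨_, ⟨h, rfl⟩, h'⟩
      · exact Or.inl rfl
  obtain ⟨H1, H2, H3⟩ := fold_char
    (f := fun best i => List.foldl (fun best k => if PySem.Int.mod (PL.getD i 0 + PL.getD k 0) 2 = 0 ∧ (PySem.Set.ofList PL).contains (PySem.Int.floordiv (PL.getD i 0 + PL.getD k 0) 2) = true then max best (PySem.Int.floordiv (PL.getD k 0 - PL.getD i 0) 2) else best) best (List.range' (i+1) (c.length + 1 - (i+1))))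
    (V := (fun (i : Nat) (v : Int) => ∃ k ∈ List.range' (i+1) (c.length + 1 - (i+1)), (PySem.Int.mod (PL.getD i 0 + PL.getD k 0) 2 = 0 ∧ (PySem.Set.ofList PL).contains (PySem.Int.floordiv (PL.getD i 0 + PL.getD k 0) 2) = true) ∧ v = PySem.Int.floordiv (PL.getD k 0 - PL.getD i 0) 2))
    (fun a i => (innerchar i _ a).1)
    (fun a i v hv => by
      obtain ⟨k, hk, hc, rfl⟩ := hv
      exact (innerchar i _ a).2.1 k hk _ ⟨hc, rfl⟩)
    (fun a i => by
      rcases (innerchar i (List.range' (i+1) (c.length + 1 - (i+1))) a).2.2 with h | ⟨k, hk, v, ⟨hc, rfl⟩, he⟩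
      · exact Or.inl h
      · exact Or.inr ⟨_, ⟨k, hk, hc, rfl⟩, he⟩)
    (List.range (c.length + 1)) 0
  refine ⟨H1, ?_, ?_⟩
  · intro m i j hp
    obtain ⟨him, hmj, hjn, heq⟩ := hp
    have ht : pf c i + pf c (j+1) = 2 * pf c (m+1) := by omega
    apply H2 i (List.mem_range.mpr (by omega))
    refine ⟨j+1, List.mem_range'_1.mpr ⟨by omega, by omega⟩, ?_, ?_⟩
    · rw [Pget i (by omega), Pget (j+1) (by omega), ht]
      constructor
      · exact mod2 _
      · rw [fd2]
        exact (PySem.Set.contains_iff _ _).mpr ((PySem.Set.mem_ofList _ _).mpr ((Pmem _).mpr ⟨m+1, by omega, rfl⟩))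
    · rw [Pget i (by omega), Pget (j+1) (by omega)]
      have e : pf c (j+1) - pf c i = 2 * (pf c (m+1) - pf c i) := by omega
      rw [e, fd2]
  · rcases H3 with h | ⟨i, hi, v, ⟨k, hk, hcond, rfl⟩, hres⟩
    · exact Or.inl h
    · have hi' : i < c.length + 1 := List.mem_range.mp hi
      have hk' := List.mem_range'_1.mp hk
      have hkn : k ≤ c.length := by omega
      have hik0 : i < k := by omega
      rw [Pget i (by omega), Pget k (by omega)] at hcond
      obtain ⟨hmod, hcont⟩ := hcond
      obtain ⟨h2q, hq⟩ := (PySem.Int.mod_eq_zero_iff_dvd _ _).mp hmod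
      have hfd : PySem.Int.floordiv (pf c i + pf c k) 2 = h2q := by rw [hq, fd2]
      rw [hfd] at hcont
      obtain ⟨t, htn, hpt⟩ := (Pmem _).mp ((PySem.Set.mem_ofList _ _).mp ((PySem.Set.contains_iff _ _).mp hcont))
      by_cases hik : pf c i = pf c k
      · left
        rw [hres, Pget i (by omega), Pget k (by omega), hik, sub_self]
        have := fd2 0
        simp only [mul_zero] at this
        exact this
      · have hlt : pf c i < pf c k := lt_of_le_of_ne (pf_mono c hpos (by omega)) hik
        have hb1 : pf c i < h2q := by omega
        have hb2 : h2q < pf c k := by omega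
        have hit : i < t := by
          by_contra h
          push_neg at h
          have := pf_mono c hpos h
          omega
        have htk : t < k := by
          by_contra h
          push_neg at h
          have := pf_mono c hpos h
          omega
        right
        refine ⟨t - 1, i, k - 1, ⟨by omega, by omega, by omega, ?_⟩, ?_⟩
        · have e1 : t - 1 + 1 = t := by omega
          have e2 : k - 1 + 1 = k := by omega
          rw [e1, e2, hpt]
          omega
        · have e1 : t - 1 + 1 = t := by omega
          rw [e1, hpt, hres, Pget i (by omega), Pget k (by omega)]
          have e : pf c k - pf c i = 2 * (h2q - pf c i) := by omega
          rw [e, fd2]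

-- B's result with no sign assumption: nonnegative, and 0 or a half-difference of prefix sums
theorem solution_alt_basic (c : List Int) :
    0 ≤ solution_alt c ∧
    (solution_alt c = 0 ∨ ∃ i k : Nat, i < k ∧ k ≤ c.length ∧
      (∃ t, t ≤ c.length ∧ 2 * pf c t = pf c i + pf c k) ∧
      solution_alt c = PySem.Int.floordiv (pf c k - pf c i) 2) := by
  have gen : ∀ (d : List Int) (acc : Int),
      acc :: buildP d acc = (List.range (d.length + 1)).map (fun i => acc + pf d i) := by
    intro d
    induction d with
    | nil => intro acc; simp [buildP, pf]
    | cons x xs ihx =>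
      intro acc
      show acc :: (acc + x) :: buildP xs (acc + x) = _
      rw [List.range_succ_eq_map, List.map_cons, List.map_map]
      congr 1
      · simp [pf]
      · rw [ihx (acc + x)]
        apply List.map_congr_left
        intro i _
        simp only [Function.comp_apply, pf, List.take_succ_cons, List.sum_cons]
        ring
  have hP : (0 : Int) :: buildP c 0 = (List.range (c.length + 1)).map (pf c) := by
    have := gen c 0
    simpa using this
  have Pget : ∀ i : Nat, i ≤ c.length → ((List.range (c.length + 1)).map (pf c)).getD i 0 = pf c i := by
    intro i hi
    rw [List.getD_eq_getElem _ 0 (by simp; omega)]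
    simp
  have fd2 : ∀ q : Int, PySem.Int.floordiv (2 * q) 2 = q := by
    intro q
    rw [PySem.Int.floordiv_eq_ediv_of_pos (by norm_num)]
    exact Int.mul_ediv_cancel_left q (by norm_num)
  have Pmem : ∀ y : Int, y ∈ (List.range (c.length + 1)).map (pf c) ↔ ∃ t, t ≤ c.length ∧ pf c t = y := by
    intro y
    simp only [List.mem_map, List.mem_range]
    constructor
    · rintro ⟨t, ht, rfl⟩; exact ⟨t, by omega, rfl⟩
    · rintro ⟨t, ht, rfl⟩; exact ⟨t, by omega, rfl⟩
  simp only [solution_alt, hP, List.length_map, List.length_range]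
  set PL := List.map (pf c) (List.range (c.length + 1)) with hPL
  have innerchar : ∀ (i : Nat) (l : List Nat) (a : Int),
      a ≤ l.foldl (fun best k => if PySem.Int.mod (PL.getD i 0 + PL.getD k 0) 2 = 0 ∧ (PySem.Set.ofList PL).contains (PySem.Int.floordiv (PL.getD i 0 + PL.getD k 0) 2) = true then max best (PySem.Int.floordiv (PL.getD k 0 - PL.getD i 0) 2) else best) a ∧
      (∀ k ∈ l, ∀ v, (fun (k : Nat) (v : Int) => (PySem.Int.mod (PL.getD i 0 + PL.getD k 0) 2 = 0 ∧ (PySem.Set.ofList PL).contains (PySem.Int.floordiv (PL.getD i 0 + PL.getD k 0) 2) = true) ∧ v = PySem.Int.floordiv (PL.getD k 0 - PL.getD i 0) 2) k v → v ≤ l.foldl (fun best k => if PySem.Int.mod (PL.getD i 0 + PL.getD k 0) 2 = 0 ∧ (PySem.Set.ofList PL).contains (PySem.Int.floordiv (PL.getD i 0 + PL.getD k 0) 2) = true then max best (PySem.Int.floordiv (PL.getD k 0 - PL.getD i 0) 2) else best) a) ∧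
      (l.foldl (fun best k => if PySem.Int.mod (PL.getD i 0 + PL.getD k 0) 2 = 0 ∧ (PySem.Set.ofList PL).contains (PySem.Int.floordiv (PL.getD i 0 + PL.getD k 0) 2) = true then max best (PySem.Int.floordiv (PL.getD k 0 - PL.getD i 0) 2) else best) a = a ∨ ∃ k ∈ l, ∃ v, (fun (k : Nat) (v : Int) => (PySem.Int.mod (PL.getD i 0 + PL.getD k 0) 2 = 0 ∧ (PySem.Set.ofList PL).contains (PySem.Int.floordiv (PL.getD i 0 + PL.getD k 0) 2) = true) ∧ v = PySem.Int.floordiv (PL.getD k 0 - PL.getD i 0) 2) k v ∧ l.foldl (fun best k => if PySem.Int.mod (PL.getD i 0 + PL.getD k 0) 2 = 0 ∧ (PySem.Set.ofList PL).contains (PySem.Int.floordiv (PL.getD i 0 + PL.getD k 0) 2) = true then max best (PySem.Int.floordiv (PL.getD k 0 - PL.getD i 0) 2) else best) a = v) := by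
    intro i
    apply fold_char
    · intro a k
      dsimp only
      split_ifs
      · exact le_max_left _ _
      · exact le_refl _
    · intro a k v hv
      obtain ⟨hc, rfl⟩ := hv
      rw [if_pos hc]
      exact le_max_right _ _
    · intro a k
      dsimp only
      split_ifs with h
      · rcases max_choice a (PySem.Int.floordiv (PL.getD k 0 - PL.getD i 0) 2) with h' | h'
        · exact Or.inl h'
        · exact Or.inr ⟨_, ⟨h, rfl⟩, h'⟩
      · exact Or.inl rfl
  obtain ⟨H1, H2, H3⟩ := fold_char
    (f := fun best i => List.foldl (fun best k => if PySem.Int.mod (PL.getD i 0 + PL.getD k 0) 2 = 0 ∧ (PySem.Set.ofList PL).contains (PySem.Int.floordiv (PL.getD i 0 + PL.getD k 0) 2) = true then max best (PySem.Int.floordiv (PL.getD k 0 - PL.getD i 0) 2) else best) best (List.range' (i+1) (c.length + 1 - (i+1))))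
    (V := (fun (i : Nat) (v : Int) => ∃ k ∈ List.range' (i+1) (c.length + 1 - (i+1)), (PySem.Int.mod (PL.getD i 0 + PL.getD k 0) 2 = 0 ∧ (PySem.Set.ofList PL).contains (PySem.Int.floordiv (PL.getD i 0 + PL.getD k 0) 2) = true) ∧ v = PySem.Int.floordiv (PL.getD k 0 - PL.getD i 0) 2))
    (fun a i => (innerchar i _ a).1)
    (fun a i v hv => by
      obtain ⟨k, hk, hc, rfl⟩ := hv
      exact (innerchar i _ a).2.1 k hk _ ⟨hc, rfl⟩)
    (fun a i => by
      rcases (innerchar i (List.range' (i+1) (c.length + 1 - (i+1))) a).2.2 with h | ⟨k, hk, v, ⟨hc, rfl⟩, he⟩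
      · exact Or.inl h
      · exact Or.inr ⟨_, ⟨k, hk, hc, rfl⟩, he⟩)
    (List.range (c.length + 1)) 0
  refine ⟨H1, ?_⟩
  rcases H3 with h | ⟨i, hi, v, ⟨k, hk, hcond, rfl⟩, hres⟩
  · exact Or.inl h
  · have hi' : i < c.length + 1 := List.mem_range.mp hi
    have hk' := List.mem_range'_1.mp hk
    rw [Pget i (by omega), Pget k (by omega)] at hcond
    obtain ⟨hmod, hcont⟩ := hcond
    obtain ⟨h2q, hq⟩ := (PySem.Int.mod_eq_zero_iff_dvd _ _).mp hmod
    have hfd : PySem.Int.floordiv (pf c i + pf c k) 2 = h2q := by rw [hq, fd2]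
    rw [hfd] at hcont
    obtain ⟨t, htn, hpt⟩ := (Pmem _).mp ((PySem.Set.mem_ofList _ _).mp ((PySem.Set.contains_iff _ _).mp hcont))
    right
    refine ⟨i, k, by omega, by omega, ⟨t, htn, by omega⟩, ?_⟩
    rw [hres, Pget i (by omega), Pget k (by omega)]

-- when every balanced prefix pair has nonpositive half-difference, B's candidates are all ≤ 0
theorem solution_alt_pre3 (c : List Int)
    (h3 : ∀ i ∈ List.range (c.length + 1), ∀ k ∈ List.range (c.length + 1),
      ∀ t ∈ List.range (c.length + 1),
      i < k → 2 * pf c t = pf c i + pf c k → pf c k ≤ pf c i) :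
    solution_alt c = 0 := by
  obtain ⟨h0, hV⟩ := solution_alt_basic c
  rcases hV with h | ⟨i, k, hik, hkn, ⟨t, htn, ht⟩, h⟩
  · exact h
  · have hT := h3 i (List.mem_range.mpr (by omega)) k (List.mem_range.mpr (by omega))
      t (List.mem_range.mpr (by omega)) hik ht
    have hfd : PySem.Int.floordiv (pf c k - pf c i) 2 = (pf c k - pf c i) / 2 :=
      PySem.Int.floordiv_eq_ediv_of_pos (by norm_num)
    omega

-- ===== VERDICT (by name: the statement is the Claim_ definition above) =====
theorem solution_spec : Claim_equal_solution := by
  intro c _ hpre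
  unfold Spec_solution
  rcases hpre with hpos | hneg
  swap
  · rw [solution_pre3 c hneg, solution_alt_pre3 c hneg]
  obtain ⟨ha0, haL, haV⟩ := solution_char c hpos
  obtain ⟨hb0, hbL, hbV⟩ := solution_alt_char c hpos
  apply le_antisymm
  · rcases haV with h | ⟨m, i, j, hp, h⟩
    · omega
    · have := hbL m i j hp; omega
  · rcases hbV with h | ⟨m, i, j, hp, h⟩
    · omega
    · have := haL m i j hp; omega
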